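-- pv_equiv track=rewrite | github.com/peeteer1245/poeProfit | util.py | find_maximum_col_lengths_of_table
-- ===== SOURCE A (Python) =====
-- def find_maximum_col_lengths_of_table(table: list, padding=0) -> list:
--     # initialize list with n elements
--     longest_column_length = [0] * len(table[0])
--
--     for row in table:
--         for column in range(len(row)):
--             if len(str(row[column])) > longest_column_length[column]:
--                 longest_column_length[column] = len(str(row[column]))
--
--     for i in range(len(longest_column_length)):
--         longest_column_length[i] += padding
--
--     return longest_column_length
-- ===== SOURCE B (Python) =====
-- # Column-major: take each column's max length directly, instead of A's
-- # row-major running-max array.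
-- def find_maximum_col_lengths_of_table(table: list, padding=0) -> list:
--     return [
--         max((len(str(row[j])) for row in table if j < len(row)), default=0) + padding
--         for j in range(len(table[0]))
--     ]
-- ===== Notes on version B (the rewrite author's own statement) =====
-- stated objective: idiomatic
-- what changed: Replaces A's row-major loop mutating a running-max array (plus a second padding pass) with a single column-major comprehension that takes each column's max directly with max(..., default=0).
import Mathlib
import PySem

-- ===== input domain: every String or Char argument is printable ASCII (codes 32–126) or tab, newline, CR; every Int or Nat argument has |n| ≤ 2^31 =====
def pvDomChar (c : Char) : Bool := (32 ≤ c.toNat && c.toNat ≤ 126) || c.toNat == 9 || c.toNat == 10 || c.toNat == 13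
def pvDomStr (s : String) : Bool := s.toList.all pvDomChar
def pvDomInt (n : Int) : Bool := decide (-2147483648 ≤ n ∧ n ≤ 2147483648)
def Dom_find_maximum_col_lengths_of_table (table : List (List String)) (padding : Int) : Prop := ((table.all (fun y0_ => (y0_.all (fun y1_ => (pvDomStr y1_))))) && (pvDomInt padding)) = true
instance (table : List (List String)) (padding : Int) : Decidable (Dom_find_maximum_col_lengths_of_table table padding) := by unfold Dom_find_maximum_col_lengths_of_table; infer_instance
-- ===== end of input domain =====

-- ===== PORT A =====
-- B changes only the traversal (column-major comprehension vs row-major running-max array);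
-- A mutates no argument. Equivalence is about the return value.
-- A's inner loop body: if len(str(row[column])) > longest[column]: longest[column] = len(str(row[column]))
def pvStep (row : List String) (acc2 : List Int) (j : Nat) : List Int :=
  if PySem.Str.len (row.getD j "") > acc2.getD j 0 then acc2.set j (PySem.Str.len (row.getD j "")) else acc2

def find_maximum_col_lengths_of_table (table : List (List String)) (padding : Int) : List Int :=
  match PySem.List.pyGet? table 0 with
  | none => []  -- Python raises IndexError on table[0] here (excluded by Pre_)
  | some r0 =>
    -- longest_column_length = [0] * len(table[0])
    let init : List Int := List.replicate r0.length 0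
    -- for row in table: for column in range(len(row)): if ... : longest[column] = ...
    -- row[column]: column < len(row) always, so getD is exact there
    let longest := table.foldl (fun acc row =>
      (List.range row.length).foldl (pvStep row) acc) init
    -- for i in range(len(longest)): longest[i] += padding
    longest.map (fun x => x + padding)

-- ===== PORT B =====
def find_maximum_col_lengths_of_table_alt (table : List (List String)) (padding : Int) : List Int :=
  match PySem.List.pyGet? table 0 with
  | none => []  -- Python raises IndexError on table[0] here (excluded by Pre_)
  | some r0 =>
    (List.range r0.length).map (fun j =>
      PySem.List.maxD
        ((table.filter (fun row => decide (j < row.length))).map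
          (fun row => (PySem.Str.len (row.getD j "") : Int)))
        (fun x => x) 0
      + padding)

-- ===== PRECONDITION & SPEC =====
-- Pre_ excludes exactly the inputs on which Python A raises IndexError: the empty table
-- (table[0]) and tables with a row longer than the first row (indexing longest_column_length).
def Pre_find_maximum_col_lengths_of_table (table : List (List String)) (padding : Int) : Prop :=
  table ≠ [] ∧ ∀ row ∈ table, row.length ≤ (table.headD []).length
instance (table : List (List String)) (padding : Int) : Decidable (Pre_find_maximum_col_lengths_of_table table padding) := by unfold Pre_find_maximum_col_lengths_of_table; infer_instance
def pvWitness_find_maximum_col_lengths_of_table : List (List String) × Int := ([["ab", "c"], ["x", "yyy"]], 2)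

def Spec_find_maximum_col_lengths_of_table (table : List (List String)) (padding : Int) (out : List Int) : Prop := out = find_maximum_col_lengths_of_table_alt table padding
instance (table : List (List String)) (padding : Int) (out : List Int) : Decidable (Spec_find_maximum_col_lengths_of_table table padding out) := by unfold Spec_find_maximum_col_lengths_of_table; infer_instance

-- ===== CLAIM (what is proved, stated in full; the proofs are below) =====
def Claim_equal_find_maximum_col_lengths_of_table : Prop := ∀ (table : List (List String)) (padding : Int), Dom_find_maximum_col_lengths_of_table table padding → Pre_find_maximum_col_lengths_of_table table padding → Spec_find_maximum_col_lengths_of_table table padding (find_maximum_col_lengths_of_table table padding)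

-- ===== LEMMAS AND PROOFS =====

lemma pvStep_length (row : List String) (acc : List Int) (j : Nat) :
    (pvStep row acc j).length = acc.length := by
  unfold pvStep
  split <;> simp

lemma pvInner_length (row : List String) (m : Nat) (acc : List Int) :
    ((List.range m).foldl (pvStep row) acc).length = acc.length := by
  induction m generalizing acc with
  | zero => simp
  | succ m ih => rw [List.range_succ, List.foldl_append]; simp [pvStep_length, ih]

lemma pvStep_getD_self (row : List String) (acc : List Int) (j : Nat) (h : j < acc.length) :
    (pvStep row acc j).getD j 0 = max (acc.getD j 0) (PySem.Str.len (row.getD j "")) := by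
  unfold pvStep
  simp only [List.getD]
  split
  · rename_i hgt
    simp only [List.getElem?_set_self h, Option.getD_some]
    omega
  · rename_i hng
    omega

lemma pvStep_getD_ne (row : List String) (acc : List Int) (i j : Nat) (h : i ≠ j) :
    (pvStep row acc i).getD j 0 = acc.getD j 0 := by
  unfold pvStep; split
  · simp [List.getD, List.getElem?_set_ne h]
  · rfl

lemma pvInner_getD_ge (row : List String) (m : Nat) (acc : List Int) (j : Nat) (h : m ≤ j) :
    ((List.range m).foldl (pvStep row) acc).getD j 0 = acc.getD j 0 := by
  induction m generalizing acc with
  | zero => simp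
  | succ m ih =>
    rw [List.range_succ, List.foldl_append]
    simp only [List.foldl_cons, List.foldl_nil]
    rw [pvStep_getD_ne _ _ _ _ (by omega), ih _ (by omega)]

lemma pvInner_getD_lt (row : List String) (m : Nat) (acc : List Int) (j : Nat)
    (hj : j < m) (hlen : j < acc.length) :
    ((List.range m).foldl (pvStep row) acc).getD j 0
      = max (acc.getD j 0) (PySem.Str.len (row.getD j "")) := by
  induction m generalizing acc with
  | zero => omega
  | succ m ih =>
    rw [List.range_succ, List.foldl_append]
    simp only [List.foldl_cons, List.foldl_nil]
    rcases Nat.lt_or_ge j m with hjm | hjm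
    · rw [pvStep_getD_ne _ _ _ _ (by omega), ih _ hjm hlen]
    · have hjm' : j = m := by omega
      subst hjm'
      have hl : j < ((List.range j).foldl (pvStep row) acc).length := by
        rw [pvInner_length]; exact hlen
      rw [pvStep_getD_self row _ j hl, pvInner_getD_ge row j acc j le_rfl]

-- entry j of A's outer fold = running max over the rows that have a j-th cell
lemma pvOuter_getD (tbl : List (List String)) (acc : List Int) (j : Nat)
    (hlen : j < acc.length) (hrows : ∀ row ∈ tbl, row.length ≤ acc.length) :
    ((tbl.foldl (fun acc row => (List.range row.length).foldl (pvStep row) acc) acc).getD j 0)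
      = tbl.foldl (fun m row => if j < row.length then max m (PySem.Str.len (row.getD j "")) else m)
          (acc.getD j 0) := by
  induction tbl generalizing acc with
  | nil => rfl
  | cons row rest ih =>
    simp only [List.foldl_cons]
    rw [ih _ (by rw [pvInner_length]; exact hlen)
          (fun r hr => by rw [pvInner_length]; exact hrows r (List.mem_cons_of_mem _ hr))]
    congr 1
    split
    · rename_i h; exact pvInner_getD_lt row _ acc j h hlen
    · rename_i h; exact pvInner_getD_ge row _ acc j (by omega)

lemma pvOuter_length (tbl : List (List String)) (acc : List Int) :
    (tbl.foldl (fun acc row => (List.range row.length).foldl (pvStep row) acc) acc).length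
      = acc.length := by
  induction tbl generalizing acc with
  | nil => rfl
  | cons row rest ih => simp only [List.foldl_cons]; rw [ih, pvInner_length]

-- A's running max over the table equals B's max-with-default over the filtered column
lemma pvFoldFilter (tbl : List (List String)) (j : Nat) (a : Int) :
    tbl.foldl (fun m row => if j < row.length then max m (PySem.Str.len (row.getD j "")) else m) a
      = ((tbl.filter (fun row => decide (j < row.length))).map
          (fun row => (PySem.Str.len (row.getD j "") : Int))).foldl max a := by
  induction tbl generalizing a with
  | nil => rfl
  | cons row rest ih =>
    simp only [List.foldl_cons, List.filter_cons]
    by_cases h : j < row.length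
    · rw [if_pos h]
      simp only [h, decide_true, if_true, List.map_cons, List.foldl_cons]
      exact ih _
    · rw [if_neg h]
      simp only [h, decide_false]
      exact ih _

lemma pvFoldlMax_eq_maxD (l : List Int) (hnn : ∀ x ∈ l, 0 ≤ x) :
    l.foldl max 0 = PySem.List.maxD l (fun x => x) 0 := by
  cases l with
  | nil => rfl
  | cons x t =>
    have : PySem.List.max? (x :: t) (fun y => y) = some (t.foldl max x) :=
      PySem.List.max?_id_cons x t
    have hd : PySem.List.maxD (x :: t) (fun y => y) 0
        = (PySem.List.max? (x :: t) (fun y => y)).getD 0 := by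
      simp [PySem.List.maxD, PySem.List.max?]
    rw [hd, this]
    simp only [Option.getD_some, List.foldl_cons]
    have hx : 0 ≤ x := hnn x (by simp)
    have h1 : max 0 x = x := by omega
    rw [h1]

-- ===== VERDICT (by name: the statement is the Claim_ definition above) =====
theorem find_maximum_col_lengths_of_table_spec : Claim_equal_find_maximum_col_lengths_of_table := by
  intro table padding _ hpre
  obtain ⟨hne, hrows⟩ := hpre
  unfold Spec_find_maximum_col_lengths_of_table
  unfold find_maximum_col_lengths_of_table find_maximum_col_lengths_of_table_alt
  cases table with
  | nil => exact absurd rfl hne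
  | cons r0 rest =>
    have hget : PySem.List.pyGet? (r0 :: rest) 0 = some r0 := by
      simp [PySem.List.pyGet?, PySem.List.pyIdx?]
    rw [hget]
    simp only
    have hrows' : ∀ row ∈ (r0 :: rest), row.length ≤ (List.replicate r0.length (0:Int)).length := by
      intro row hr; rw [List.length_replicate]; simpa using hrows row hr
    apply List.ext_getElem
    · rw [List.length_map, pvOuter_length, List.length_replicate, List.length_map,
        List.length_range]
    · intro i h1 h2
      have hi : i < r0.length := by simpa using h2
      have hlen : i < (List.replicate r0.length (0:Int)).length := by simpa using hi
      have hA := pvOuter_getD (r0 :: rest) (List.replicate r0.length 0) i hlen hrows'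
      simp only [List.getElem_map, List.getElem_range]
      have hlem : ∀ (L : List Int) (h : i < L.length), L[i] = L.getD i 0 :=
        fun L h => (List.getD_eq_getElem L 0 h).symm
      rw [hlem _ _, hA]
      have hrepl : (List.replicate r0.length (0:Int)).getD i 0 = 0 := by
        simp [List.getD, hi]
      rw [hrepl, pvFoldFilter]
      congr 1
      apply pvFoldlMax_eq_maxD
      intro x hx
      simp only [List.mem_map] at hx
      obtain ⟨row, _, hrw⟩ := hx
      rw [← hrw]
      simp [PySem.Str.len]
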